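-- pv_equiv track=rewrite | github.com/OceanDECRUZ/IPSA_Project | Rescuing_human_robot/In512.py | fifth_contour
-- ===== SOURCE A (Python) =====
-- N=20 #nombre de pixel en y
--
-- M=20 #nombre de prixel en x
--
-- def first_contour(cell):
--     L=[]
--     for i in range(-1,2):
--         for j in range(-1,2):
--             if (i!=0 or j!=0) and 0<=i+cell[0]<N and 0<=j+cell[1]<M:
--                 L.append((cell[0]+i,cell[1]+j))
--     return L
--
-- def second_contour(cell):
--     L=[]
--     fc=first_contour(cell)
--     for i in range(-2,3):
--         for j in range(-2,3):
--             if (i!=0 or j!=0) and not((i+cell[0],j+cell[1]) in fc) and 0<=i+cell[0]<N and 0<=j+cell[1]<M: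
--                     L.append((cell[0]+i,cell[1]+j))
--     return L
--
-- def third_contour(cell):
--     L=[]
--     fc=first_contour(cell)
--     sc=second_contour(cell)
--     for i in range(-3,4):
--         for j in range(-3,4):
--             if (i!=0 or j!=0) and not((i+cell[0],j+cell[1]) in fc) and not((i+cell[0],j+cell[1]) in sc) and 0<=i+cell[0]<N and 0<=j+cell[1]<M:
--                     L.append((cell[0]+i,cell[1]+j))
--     return L
--
-- def fourth_contour(cell):
--     L=[]
--     fc=first_contour(cell)
--     sc=second_contour(cell)
--     tc=third_contour(cell)
--     for i in range(-4,5):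
--         for j in range(-4,5):
--             if (i!=0 or j!=0) and not((i+cell[0],j+cell[1]) in tc) and not((i+cell[0],j+cell[1]) in fc) and not((i+cell[0],j+cell[1]) in sc) and 0<=i+cell[0]<N and 0<=j+cell[1]<M:
--                     L.append((cell[0]+i,cell[1]+j))
--     return L
--
-- def fifth_contour(cell):
--     L=[]
--     fc=first_contour(cell)
--     sc=second_contour(cell)
--     tc=third_contour(cell)
--     foc=fourth_contour(cell)
--     for i in range(-5,6):
--         for j in range(-5,6):
--             if (i!=0 or j!=0) and not((i+cell[0],j+cell[1]) in foc) and not((i+cell[0],j+cell[1]) in tc) and not((i+cell[0],j+cell[1]) in fc) and not((i+cell[0],j+cell[1]) in sc) and 0<=i+cell[0]<N and 0<=j+cell[1]<M: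
--                     L.append((cell[0]+i,cell[1]+j))
--     return L
-- ===== SOURCE B (Python) =====
-- N = 20  # nombre de pixel en y
-- M = 20  # nombre de prixel en x
--
-- def fifth_contour(cell):
--     L = []
--     for i in range(-5, 6):
--         js = range(-5, 6) if abs(i) == 5 else (-5, 5)
--         for j in js:
--             if 0 <= cell[0] + i < N and 0 <= cell[1] + j < M:
--                 L.append((cell[0] + i, cell[1] + j))
--     return L
-- ===== Notes on version B (the rewrite author's own statement) =====
-- stated objective: simpler
-- what changed: B drops the four cascaded contour helpers (an 11x11 scan with membership tests against every inner contour) and enumerates the Chebyshev distance-5 ring directly: full rows only when |i|=5, otherwise just the two border columns -5 and 5, with a plain in-bounds check per cell.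
import Mathlib
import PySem

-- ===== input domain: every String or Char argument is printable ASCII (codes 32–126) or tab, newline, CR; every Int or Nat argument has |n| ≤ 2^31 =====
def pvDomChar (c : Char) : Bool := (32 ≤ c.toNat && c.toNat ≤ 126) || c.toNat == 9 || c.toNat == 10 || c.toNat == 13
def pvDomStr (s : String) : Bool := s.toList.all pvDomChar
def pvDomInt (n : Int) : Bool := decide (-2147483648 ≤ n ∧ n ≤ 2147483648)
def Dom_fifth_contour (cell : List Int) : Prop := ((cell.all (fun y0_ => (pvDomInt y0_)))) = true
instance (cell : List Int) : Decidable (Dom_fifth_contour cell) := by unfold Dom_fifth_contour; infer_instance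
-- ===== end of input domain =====

-- B replaces A's four cascaded contour helpers (a full 11x11 scan with membership
-- tests against all inner contours) by a direct enumeration of the distance-5 ring.

-- ===== PORT A =====
def pvN : Int := 20
def pvM : Int := 20

def first_contour (cell : List Int) : List (List Int) :=
  let c0 := (PySem.List.pyGet? cell 0).getD 0
  let c1 := (PySem.List.pyGet? cell 1).getD 0
  (PySem.List.pyRange (-1) 2 1).foldl (fun L i =>
    (PySem.List.pyRange (-1) 2 1).foldl (fun L j =>
      if (i ≠ 0 ∨ j ≠ 0) ∧ 0 ≤ i + c0 ∧ i + c0 < pvN ∧ 0 ≤ j + c1 ∧ j + c1 < pvM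
      then L ++ [[c0 + i, c1 + j]] else L) L) []

def second_contour (cell : List Int) : List (List Int) :=
  let c0 := (PySem.List.pyGet? cell 0).getD 0
  let c1 := (PySem.List.pyGet? cell 1).getD 0
  let fc := first_contour cell
  (PySem.List.pyRange (-2) 3 1).foldl (fun L i =>
    (PySem.List.pyRange (-2) 3 1).foldl (fun L j =>
      if (i ≠ 0 ∨ j ≠ 0) ∧ [i + c0, j + c1] ∉ fc ∧ 0 ≤ i + c0 ∧ i + c0 < pvN ∧ 0 ≤ j + c1 ∧ j + c1 < pvM
      then L ++ [[c0 + i, c1 + j]] else L) L) []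

def third_contour (cell : List Int) : List (List Int) :=
  let c0 := (PySem.List.pyGet? cell 0).getD 0
  let c1 := (PySem.List.pyGet? cell 1).getD 0
  let fc := first_contour cell
  let sc := second_contour cell
  (PySem.List.pyRange (-3) 4 1).foldl (fun L i =>
    (PySem.List.pyRange (-3) 4 1).foldl (fun L j =>
      if (i ≠ 0 ∨ j ≠ 0) ∧ [i + c0, j + c1] ∉ fc ∧ [i + c0, j + c1] ∉ sc ∧ 0 ≤ i + c0 ∧ i + c0 < pvN ∧ 0 ≤ j + c1 ∧ j + c1 < pvM
      then L ++ [[c0 + i, c1 + j]] else L) L) []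

def fourth_contour (cell : List Int) : List (List Int) :=
  let c0 := (PySem.List.pyGet? cell 0).getD 0
  let c1 := (PySem.List.pyGet? cell 1).getD 0
  let fc := first_contour cell
  let sc := second_contour cell
  let tc := third_contour cell
  (PySem.List.pyRange (-4) 5 1).foldl (fun L i =>
    (PySem.List.pyRange (-4) 5 1).foldl (fun L j =>
      if (i ≠ 0 ∨ j ≠ 0) ∧ [i + c0, j + c1] ∉ tc ∧ [i + c0, j + c1] ∉ fc ∧ [i + c0, j + c1] ∉ sc ∧ 0 ≤ i + c0 ∧ i + c0 < pvN ∧ 0 ≤ j + c1 ∧ j + c1 < pvM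
      then L ++ [[c0 + i, c1 + j]] else L) L) []

def fifth_contour (cell : List Int) : List (List Int) :=
  let c0 := (PySem.List.pyGet? cell 0).getD 0
  let c1 := (PySem.List.pyGet? cell 1).getD 0
  let fc := first_contour cell
  let sc := second_contour cell
  let tc := third_contour cell
  let foc := fourth_contour cell
  (PySem.List.pyRange (-5) 6 1).foldl (fun L i =>
    (PySem.List.pyRange (-5) 6 1).foldl (fun L j =>
      if (i ≠ 0 ∨ j ≠ 0) ∧ [i + c0, j + c1] ∉ foc ∧ [i + c0, j + c1] ∉ tc ∧ [i + c0, j + c1] ∉ fc ∧ [i + c0, j + c1] ∉ sc ∧ 0 ≤ i + c0 ∧ i + c0 < pvN ∧ 0 ≤ j + c1 ∧ j + c1 < pvM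
      then L ++ [[c0 + i, c1 + j]] else L) L) []

-- ===== PORT B =====
def fifth_contour_alt (cell : List Int) : List (List Int) :=
  let c0 := (PySem.List.pyGet? cell 0).getD 0
  let c1 := (PySem.List.pyGet? cell 1).getD 0
  (PySem.List.pyRange (-5) 6 1).foldl (fun L i =>
    (if (if i < 0 then -i else i) = 5 then PySem.List.pyRange (-5) 6 1 else [-5, 5]).foldl (fun L j =>
      if 0 ≤ c0 + i ∧ c0 + i < pvN ∧ 0 ≤ c1 + j ∧ c1 + j < pvM
      then L ++ [[c0 + i, c1 + j]] else L) L) []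

-- ===== PRECONDITION & SPEC =====
-- Pre_ excludes only lists of fewer than two elements, on which A raises IndexError
-- at cell[0]/cell[1] (B raises there too).
def Pre_fifth_contour (cell : List Int) : Prop := 2 ≤ cell.length
instance (cell : List Int) : Decidable (Pre_fifth_contour cell) := by unfold Pre_fifth_contour; infer_instance
def pvWitness_fifth_contour : List Int := [3, 7]

def Spec_fifth_contour (cell : List Int) (out : List (List Int)) : Prop := out = fifth_contour_alt cell
instance (cell : List Int) (out : List (List Int)) : Decidable (Spec_fifth_contour cell out) := by unfold Spec_fifth_contour; infer_instance

-- ===== CLAIM (what is proved, stated in full; the proofs are below) =====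
def Claim_equal_fifth_contour : Prop := ∀ (cell : List Int), Dom_fifth_contour cell → Pre_fifth_contour cell → Spec_fifth_contour cell (fifth_contour cell)

-- ===== LEMMAS AND PROOFS =====

-- The square of offsets [-k..k] × [-k..k] in row-major order, the Chebyshev norm,
-- the distance-k ring, and the bounded translated selection both ports compute.
def pvSq (k : Nat) : List (Int × Int) :=
  (PySem.List.pyRange (-(k : Int)) (k + 1) 1).flatMap (fun i =>
    (PySem.List.pyRange (-(k : Int)) (k + 1) 1).map (fun j => (i, j)))

def pvChb (p : Int × Int) : Nat := p.1.natAbs ⊔ p.2.natAbs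

def pvRing (k : Nat) : List (Int × Int) := (pvSq k).filter (fun p => decide (pvChb p = k))

def pvSel (a b : Int) (R : List (Int × Int)) : List (List Int) :=
  R.flatMap (fun p =>
    if 0 ≤ p.1 + a ∧ p.1 + a < pvN ∧ 0 ≤ p.2 + b ∧ p.2 + b < pvM
    then [[a + p.1, b + p.2]] else [])

lemma foldl_if_eq_flatMap {α β : Type} (cols : List α) (P : α → Prop) [DecidablePred P]
    (f : α → β) (L : List β) :
    cols.foldl (fun L j => if P j then L ++ [f j] else L) L
      = L ++ cols.flatMap (fun j => if P j then [f j] else []) := by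
  induction cols generalizing L with
  | nil => simp
  | cons c cs ih => by_cases h : P c <;> simp [h, ih]

lemma loop2_eq_flatMap {β : Type} (rows : List Int) (cols : Int → List Int)
    (P : Int → Int → Prop) [∀ i j, Decidable (P i j)] (f : Int → Int → β) :
    rows.foldl (fun L i => (cols i).foldl (fun L j => if P i j then L ++ [f i j] else L) L) []
      = rows.flatMap (fun i => (cols i).flatMap (fun j => if P i j then [f i j] else [])) := by
  suffices h : ∀ L : List β,
      rows.foldl (fun L i => (cols i).foldl (fun L j => if P i j then L ++ [f i j] else L) L) L
        = L ++ rows.flatMap (fun i => (cols i).flatMap (fun j => if P i j then [f i j] else [])) by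
    simpa using h []
  induction rows with
  | nil => simp
  | cons r rs ih => intro L; simp [foldl_if_eq_flatMap, List.flatMap]

lemma flatMap_sq {β : Type} (k : Nat) (g : Int × Int → List β) :
    (pvSq k).flatMap g
      = (PySem.List.pyRange (-(k : Int)) (k + 1) 1).flatMap (fun i =>
          (PySem.List.pyRange (-(k : Int)) (k + 1) 1).flatMap (fun j => g (i, j))) := by
  simp [pvSq, List.flatMap_assoc, List.flatMap_map]

lemma mem_sq (k : Nat) (i j : Int) :
    (i, j) ∈ pvSq k ↔ (-(k : Int) ≤ i ∧ i < k + 1 ∧ -(k : Int) ≤ j ∧ j < k + 1) := by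
  simp only [pvSq, List.mem_flatMap, List.mem_map, PySem.List.mem_pyRange_one,
    Prod.mk.injEq]
  constructor
  · rintro ⟨u, hu, v, hv, h1, h2⟩; subst h1; subst h2; exact ⟨hu.1, hu.2, hv.1, hv.2⟩
  · rintro ⟨h1, h2, h3, h4⟩; exact ⟨i, ⟨h1, h2⟩, j, ⟨h3, h4⟩, rfl, rfl⟩

lemma mem_ring (k : Nat) (hk : 0 < k) (i j : Int) :
    (i, j) ∈ pvRing k ↔ pvChb (i, j) = k := by
  simp [pvRing, List.mem_filter, mem_sq, pvChb]
  omega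

lemma mem_sel (a b i j : Int) (R : List (Int × Int)) :
    [i + a, j + b] ∈ pvSel a b R ↔
      ((i, j) ∈ R ∧ (0 ≤ i + a ∧ i + a < pvN ∧ 0 ≤ j + b ∧ j + b < pvM)) := by
  simp only [pvSel, List.mem_flatMap]
  constructor
  · rintro ⟨⟨u, v⟩, hm, hx⟩
    split at hx
    · rename_i hcond
      simp at hx
      obtain ⟨h1, h2⟩ := hx
      have hu : u = i := by omega
      have hv : v = j := by omega
      subst hu; subst hv
      exact ⟨hm, by simpa using hcond⟩
    · simp at hx
  · rintro ⟨hm, hb⟩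
    refine ⟨(i, j), hm, ?_⟩
    rw [if_pos (by simpa using hb)]
    simp [add_comm]

lemma flatMap_if_and {α β : Type} (l : List α) (q : α → Prop) [DecidablePred q]
    (r : α → Prop) [DecidablePred r] (f : α → List β) :
    l.flatMap (fun p => if q p ∧ r p then f p else [])
      = (l.filter (fun p => decide (q p))).flatMap (fun p => if r p then f p else []) := by
  induction l with
  | nil => simp
  | cons p ps ih =>
    by_cases hc : q p
    · by_cases hr : r p <;> simp [hc, hr, ih]
    · simp [hc, ih]

lemma flatMap_ring_if {β : Type} (k : Nat) (r : Int × Int → Prop) [DecidablePred r]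
    (f : Int × Int → List β) :
    (pvSq k).flatMap (fun p => if pvChb p = k ∧ r p then f p else [])
      = (pvRing k).flatMap (fun p => if r p then f p else []) := by
  unfold pvRing
  exact flatMap_if_and (pvSq k) (fun p => pvChb p = k) r f

lemma mem_sel_not (x y i j : Int) (k : Nat) (hk : 0 < k) :
    ([i + x, j + y] ∈ pvSel x y (pvRing k)) =
      (pvChb (i, j) = k ∧ (0 ≤ i + x ∧ i + x < pvN ∧ 0 ≤ j + y ∧ j + y < pvM)) := by
  rw [mem_sel, mem_ring k hk]

lemma sel_eq_sq {x y : Int} (k : Nat) :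
    pvSel x y (pvRing k)
      = (pvSq k).flatMap (fun p =>
          if pvChb p = k ∧ (0 ≤ p.1 + x ∧ p.1 + x < pvN ∧ 0 ≤ p.2 + y ∧ p.2 + y < pvM)
          then [[x + p.1, y + p.2]] else []) := by
  unfold pvSel
  exact (flatMap_ring_if k _ _).symm

lemma first_eq (x y : Int) (t : List Int) :
    first_contour (x :: y :: t) = pvSel x y (pvRing 1) := by
  unfold first_contour
  rw [loop2_eq_flatMap, sel_eq_sq 1, flatMap_sq]
  norm_num
  apply List.flatMap_congr; intro i hi
  apply List.flatMap_congr; intro j hj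
  rw [PySem.List.mem_pyRange_one] at hi hj
  apply if_congr _ rfl rfl
  simp only [pvChb, pvN, pvM]
  omega

lemma second_eq (x y : Int) (t : List Int) :
    second_contour (x :: y :: t) = pvSel x y (pvRing 2) := by
  unfold second_contour
  rw [first_eq, loop2_eq_flatMap, sel_eq_sq 2, flatMap_sq]
  norm_num
  apply List.flatMap_congr; intro i hi
  apply List.flatMap_congr; intro j hj
  rw [PySem.List.mem_pyRange_one] at hi hj
  apply if_congr _ rfl rfl
  rw [mem_sel_not x y i j 1 (by decide)]
  simp only [pvChb, pvN, pvM]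
  omega

lemma third_eq (x y : Int) (t : List Int) :
    third_contour (x :: y :: t) = pvSel x y (pvRing 3) := by
  unfold third_contour
  rw [first_eq, second_eq, loop2_eq_flatMap, sel_eq_sq 3, flatMap_sq]
  norm_num
  apply List.flatMap_congr; intro i hi
  apply List.flatMap_congr; intro j hj
  rw [PySem.List.mem_pyRange_one] at hi hj
  apply if_congr _ rfl rfl
  rw [mem_sel_not x y i j 1 (by decide), mem_sel_not x y i j 2 (by decide)]
  simp only [pvChb, pvN, pvM]
  omega

lemma fourth_eq (x y : Int) (t : List Int) :
    fourth_contour (x :: y :: t) = pvSel x y (pvRing 4) := by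
  unfold fourth_contour
  rw [first_eq, second_eq, third_eq, loop2_eq_flatMap, sel_eq_sq 4, flatMap_sq]
  norm_num
  apply List.flatMap_congr; intro i hi
  apply List.flatMap_congr; intro j hj
  rw [PySem.List.mem_pyRange_one] at hi hj
  apply if_congr _ rfl rfl
  rw [mem_sel_not x y i j 1 (by decide), mem_sel_not x y i j 2 (by decide), mem_sel_not x y i j 3 (by decide)]
  simp only [pvChb, pvN, pvM]
  omega

lemma fifth_eq (x y : Int) (t : List Int) :
    fifth_contour (x :: y :: t) = pvSel x y (pvRing 5) := by
  unfold fifth_contour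
  rw [first_eq, second_eq, third_eq, fourth_eq, loop2_eq_flatMap, sel_eq_sq 5, flatMap_sq]
  norm_num
  apply List.flatMap_congr; intro i hi
  apply List.flatMap_congr; intro j hj
  rw [PySem.List.mem_pyRange_one] at hi hj
  apply if_congr _ rfl rfl
  rw [mem_sel_not x y i j 1 (by decide), mem_sel_not x y i j 2 (by decide), mem_sel_not x y i j 3 (by decide), mem_sel_not x y i j 4 (by decide)]
  simp only [pvChb, pvN, pvM]
  omega

lemma alt_eq (x y : Int) (t : List Int) :
    fifth_contour_alt (x :: y :: t) = pvSel x y (pvRing 5) := by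
  unfold fifth_contour_alt
  rw [loop2_eq_flatMap, sel_eq_sq 5, flatMap_sq]
  norm_num
  apply List.flatMap_congr; intro i hi
  rw [PySem.List.mem_pyRange_one] at hi
  obtain ⟨hi1, hi2⟩ := hi
  rw [flatMap_if_and (PySem.List.pyRange (-5) 6 1) (fun j => pvChb (i, j) = 5)]
  have hcols : (if (if i < 0 then -i else i) = 5 then PySem.List.pyRange (-5) 6 1 else ([-5, 5] : List Int))
      = (PySem.List.pyRange (-5) 6 1).filter (fun j => decide (pvChb (i, j) = 5)) := by
    interval_cases i <;> decide
  rw [hcols]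
  apply List.flatMap_congr; intro j hj
  apply if_congr _ rfl rfl
  simp only [pvN, pvM]
  omega

-- ===== VERDICT (by name: the statement is the Claim_ definition above) =====
theorem fifth_contour_spec : Claim_equal_fifth_contour := by
  intro cell _ hpre
  unfold Spec_fifth_contour
  match cell, hpre with
  | x :: y :: t, _ => rw [fifth_eq, alt_eq]
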